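-- pv_equiv track=rewrite | github.com/lsw6684/Algorithm | Programmers/두 개 뽑아서 더하기.py | solution
-- ===== SOURCE A (Python) =====
-- def solution(numbers):
--     answer = []
--     for x, a in enumerate(numbers):
--         for y, b in enumerate(numbers):
--             if x == y:
--                 continue;
--             answer.append(a+b)
--     return sorted(list(set(answer)))
-- ===== SOURCE B (Python) =====
-- def solution(numbers):
--     sums = set()
--     seen = set()
--     for n in numbers:
--         for s in seen:
--             sums.add(s + n)
--         seen.add(n)
--     return sorted(sums)
-- ===== Notes on version B (the rewrite author's own statement) =====
-- stated objective: faster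
-- what changed: replaces the double scan over all ordered index pairs followed by dedup-and-sort with a single left-to-right pass that keeps a set of previously seen distinct values and adds s+n for each, so only unordered pairs of distinct values are ever formed and duplicate values contribute no repeated work
import Mathlib
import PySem

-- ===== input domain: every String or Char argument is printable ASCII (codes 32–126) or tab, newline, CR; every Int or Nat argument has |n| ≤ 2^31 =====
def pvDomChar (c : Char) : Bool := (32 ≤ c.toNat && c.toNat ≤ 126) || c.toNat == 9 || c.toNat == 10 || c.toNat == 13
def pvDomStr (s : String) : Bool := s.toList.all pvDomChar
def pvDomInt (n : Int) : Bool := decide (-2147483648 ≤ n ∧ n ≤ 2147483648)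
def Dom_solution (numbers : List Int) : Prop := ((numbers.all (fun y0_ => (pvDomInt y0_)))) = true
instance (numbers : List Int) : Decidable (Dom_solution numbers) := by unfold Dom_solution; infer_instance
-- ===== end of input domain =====

-- B replaces the double scan over all ordered index pairs + dedup-and-sort by one pass
-- keeping a set of previously seen distinct values (alternative algorithm, same results).

-- ===== PORT A =====
def solution (numbers : List Int) : List Int :=
  let answer : List Int :=
    (PySem.List.enumerate numbers 0).foldl (fun acc xa =>
      (PySem.List.enumerate numbers 0).foldl (fun acc yb =>
        if xa.1 == yb.1 then acc else acc ++ [xa.2 + yb.2]) acc) []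
  PySem.List.sorted (PySem.Set.ofList answer) (fun x => x) false

-- ===== PORT B =====
def solution_alt (numbers : List Int) : List Int :=
  let st : PySem.Set Int × PySem.Set Int :=
    numbers.foldl (fun (st : PySem.Set Int × PySem.Set Int) n =>
      (st.2.foldl (fun sums s => PySem.Set.add sums (s + n)) st.1,
       PySem.Set.add st.2 n)) (PySem.Set.empty, PySem.Set.empty)
  PySem.List.sorted st.1 (fun x => x) false

-- ===== PRECONDITION & SPEC =====
def Spec_solution (numbers : List Int) (out : List Int) : Prop := out = solution_alt numbers
instance (numbers : List Int) (out : List Int) : Decidable (Spec_solution numbers out) := by unfold Spec_solution; infer_instance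

-- ===== CLAIM (what is proved, stated in full; the proofs are below) =====
def Claim_equal_solution : Prop := ∀ (numbers : List Int), Dom_solution numbers → Spec_solution numbers (solution numbers)

-- ===== LEMMAS AND PROOFS =====

-- the common characterisation: z is the sum of two elements at indices i < j
def IdxPair (l : List Int) (z : Int) : Prop :=
  ∃ i j : Nat, i < j ∧ j < l.length ∧ z = l.getD i 0 + l.getD j 0

-- B's loop step
def stepB (st : PySem.Set Int × PySem.Set Int) (n : Int) : PySem.Set Int × PySem.Set Int :=
  (st.2.foldl (fun sums s => PySem.Set.add sums (s + n)) st.1, PySem.Set.add st.2 n)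

lemma snd_foldl_stepB (l : List Int) (st : PySem.Set Int × PySem.Set Int) :
    (l.foldl stepB st).2 = l.foldl PySem.Set.add st.2 := by
  induction l generalizing st with
  | nil => rfl
  | cons n t ih => simpa [stepB] using ih _

lemma nodup_foldl_add (f : Int → Int) (ts s : List Int) (hs : s.Nodup) :
    (ts.foldl (fun s b => PySem.Set.add s (f b)) s).Nodup := by
  induction ts generalizing s with
  | nil => exact hs
  | cons b t ih => exact ih _ (PySem.Set.nodup_add _ _ hs)

lemma nodup_fst_foldl_stepB (l : List Int) (st : PySem.Set Int × PySem.Set Int)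
    (hs : st.1.Nodup) : (l.foldl stepB st).1.Nodup := by
  induction l generalizing st with
  | nil => exact hs
  | cons n t ih => exact ih _ (nodup_foldl_add _ _ _ hs)

lemma idxPair_append_singleton (xs : List Int) (x z : Int) :
    IdxPair (xs ++ [x]) z ↔ IdxPair xs z ∨ ∃ s ∈ xs, z = s + x := by
  constructor
  · rintro ⟨i, j, hij, hj, hz⟩
    simp only [List.length_append, List.length_singleton] at hj
    by_cases hjl : j < xs.length
    · left
      refine ⟨i, j, hij, hjl, ?_⟩
      rw [List.getD_append _ _ _ _ (by omega), List.getD_append _ _ _ _ (by omega)] at hz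
      exact hz
    · right
      have hj' : j = xs.length := by omega
      have hi : i < xs.length := by omega
      refine ⟨xs.getD i 0, ?_, ?_⟩
      · rw [List.getD_eq_getElem _ _ hi]; exact List.getElem_mem hi
      rw [List.getD_append _ _ _ _ hi] at hz
      have : (xs ++ [x]).getD j 0 = x := by
        subst hj'
        simp [List.getD]
      rw [this] at hz
      exact hz
  · rintro (⟨i, j, hij, hj, hz⟩ | ⟨s, hs, hz⟩)
    · exact ⟨i, j, hij, by simp; omega,
        by rw [List.getD_append _ _ _ _ (by omega), List.getD_append _ _ _ _ (by omega)]; exact hz⟩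
    · obtain ⟨i, hi, hxi⟩ := List.mem_iff_getElem.mp hs
      refine ⟨i, xs.length, hi, by simp, ?_⟩
      rw [List.getD_append _ _ _ _ hi]
      have : (xs ++ [x]).getD xs.length 0 = x := by
        simp [List.getD]
      rw [this, List.getD_eq_getElem _ _ hi, hxi]
      exact hz

lemma mem_fst_foldl_stepB (l : List Int) (z : Int) :
    z ∈ (l.foldl stepB (PySem.Set.empty, PySem.Set.empty)).1 ↔ IdxPair l z := by
  induction l using List.reverseRecOn with
  | nil =>
    simp only [List.foldl_nil]
    constructor
    · intro h; cases h
    · rintro ⟨i, j, _, hj, _⟩; simp at hj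
  | append_singleton xs x ih =>
    rw [List.foldl_append, List.foldl_cons, List.foldl_nil, idxPair_append_singleton]
    show z ∈ (stepB _ x).1 ↔ _
    rw [stepB]
    simp only
    rw [PySem.Set.mem_foldl_add]
    have hseen : (xs.foldl stepB (PySem.Set.empty, PySem.Set.empty)).2 = PySem.Set.ofList xs := by
      rw [snd_foldl_stepB]; rfl
    rw [hseen, ih]
    constructor
    · rintro (h | ⟨b, hb, hz⟩)
      · exact Or.inl h
      · exact Or.inr ⟨b, (PySem.Set.mem_ofList _ _).mp hb, hz⟩
    · rintro (h | ⟨b, hb, hz⟩)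
      · exact Or.inl h
      · exact Or.inr ⟨b, (PySem.Set.mem_ofList _ _).mpr hb, hz⟩

-- A's answer list as a flatMap
lemma answerA_eq (numbers : List Int) :
    (PySem.List.enumerate numbers 0).foldl (fun acc xa =>
      (PySem.List.enumerate numbers 0).foldl (fun acc yb =>
        if xa.1 == yb.1 then acc else acc ++ [xa.2 + yb.2]) acc) []
    = (PySem.List.enumerate numbers 0).flatMap (fun xa =>
        ((PySem.List.enumerate numbers 0).filter (fun yb => !(xa.1 == yb.1))).map
          (fun yb => xa.2 + yb.2)) := by
  have h1 : ∀ (acc : List Int) (xa : Int × Int), xa ∈ PySem.List.enumerate numbers 0 →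
      (PySem.List.enumerate numbers 0).foldl (fun acc yb =>
        if xa.1 == yb.1 then acc else acc ++ [xa.2 + yb.2]) acc
      = acc ++ ((PySem.List.enumerate numbers 0).filter (fun yb => !(xa.1 == yb.1))).map
          (fun yb => xa.2 + yb.2) := by
    intro acc xa _
    have e1 : (PySem.List.enumerate numbers 0).foldl (fun acc yb =>
        if xa.1 == yb.1 then acc else acc ++ [xa.2 + yb.2]) acc
      = (PySem.List.enumerate numbers 0).foldl (fun acc yb =>
        if !(xa.1 == yb.1) then acc ++ [xa.2 + yb.2] else acc) acc := by
      apply PySem.List.foldl_congr_mem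
      intro a yb _
      cases h : xa.1 == yb.1 <;> rfl
    rw [e1, PySem.List.foldl_append_if]
  have step1 : (PySem.List.enumerate numbers 0).foldl (fun acc xa =>
      (PySem.List.enumerate numbers 0).foldl (fun acc yb =>
        if xa.1 == yb.1 then acc else acc ++ [xa.2 + yb.2]) acc) []
    = (PySem.List.enumerate numbers 0).foldl (fun acc xa =>
        acc ++ ((PySem.List.enumerate numbers 0).filter (fun yb => !(xa.1 == yb.1))).map
          (fun yb => xa.2 + yb.2)) [] :=
    PySem.List.foldl_congr_mem _ _ _ _ h1
  rw [step1, PySem.List.foldl_append_eq_flatMap, List.nil_append]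

lemma mem_answerA (numbers : List Int) (z : Int) :
    z ∈ (PySem.List.enumerate numbers 0).foldl (fun acc xa =>
      (PySem.List.enumerate numbers 0).foldl (fun acc yb =>
        if xa.1 == yb.1 then acc else acc ++ [xa.2 + yb.2]) acc) []
    ↔ IdxPair numbers z := by
  rw [answerA_eq]
  simp only [List.mem_flatMap, List.mem_map, List.mem_filter, PySem.List.mem_enumerate_iff]
  constructor
  · rintro ⟨xa, ⟨i, hi, rfl⟩, yb, ⟨⟨j, hj, rfl⟩, hne⟩, hz⟩
    simp only [zero_add, Bool.not_eq_eq_eq_not, Bool.not_true, beq_eq_false_iff_ne,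
      ne_eq, Int.natCast_inj] at hne
    have hij : i ≠ j := by
      intro h; exact (by simp [h] at hne)
    rcases Nat.lt_or_ge i j with hlt | hge
    · exact ⟨i, j, hlt, hj, by
        rw [List.getD_eq_getElem _ _ hi, List.getD_eq_getElem _ _ hj]; exact hz.symm⟩
    · have hlt : j < i := by omega
      exact ⟨j, i, hlt, hi, by
        rw [List.getD_eq_getElem _ _ hj, List.getD_eq_getElem _ _ hi, Int.add_comm]
        exact hz.symm⟩
  · rintro ⟨i, j, hij, hj, hz⟩
    have hi : i < numbers.length := by omega
    refine ⟨(i, numbers[i]), ⟨i, hi, by simp⟩, (j, numbers[j]), ⟨⟨j, hj, by simp⟩, ?_⟩, ?_⟩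
    · have : (i : Int) ≠ (j : Int) := by exact_mod_cast Nat.ne_of_lt hij
      simp [this]
    · rw [List.getD_eq_getElem _ _ hi, List.getD_eq_getElem _ _ hj] at hz
      exact hz.symm

-- ===== VERDICT (by name: the statement is the Claim_ definition above) =====
theorem solution_spec : Claim_equal_solution := by
  intro numbers _
  show solution numbers = solution_alt numbers
  unfold solution solution_alt
  simp only
  rw [show (fun (st : PySem.Set Int × PySem.Set Int) (n : Int) =>
      (st.2.foldl (fun sums s => PySem.Set.add sums (s + n)) st.1, PySem.Set.add st.2 n)) = stepB
    from rfl]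
  apply PySem.List.sorted_eq_sorted_of_perm _ _ _ (fun a b h => h)
  rw [List.perm_ext_iff_of_nodup (PySem.Set.nodup_ofList _)
    (nodup_fst_foldl_stepB _ _ List.nodup_nil)]
  intro z
  rw [PySem.Set.mem_ofList, mem_answerA]
  exact (mem_fst_foldl_stepB numbers z).symm
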